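-- pv_equiv track=rewrite | github.com/theumasuresh/resume | generate_readme.py | to_bold_sans
-- ===== SOURCE A (Python) =====
-- def to_bold_sans(text):
--     """Convert ASCII text to Unicode Mathematical Sans-Serif Bold."""
--     result = []
--     for c in text:
--         if "A" <= c <= "Z":
--             result.append(chr(0x1D5D4 + ord(c) - ord("A")))
--         elif "a" <= c <= "z":
--             result.append(chr(0x1D5EE + ord(c) - ord("a")))
--         elif "0" <= c <= "9":
--             result.append(chr(0x1D7EC + ord(c) - ord("0")))
--         else:
--             result.append(c)
--     return "".join(result)
-- ===== SOURCE B (Python) =====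
-- def to_bold_sans(text):
--     """Convert ASCII text to Unicode Mathematical Sans-Serif Bold."""
--     table = {}
--     for i in range(26):
--         table[ord("A") + i] = chr(0x1D5D4 + i)
--         table[ord("a") + i] = chr(0x1D5EE + i)
--     for i in range(10):
--         table[ord("0") + i] = chr(0x1D7EC + i)
--     return text.translate(table)
-- ===== Notes on version B (the rewrite author's own statement) =====
-- stated objective: idiomatic
-- what changed: Replaced the per-character Python-level branch chain with a translation table built once (ord -> bold-sans char for the three ranges) applied in one str.translate pass.
import Mathlib
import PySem

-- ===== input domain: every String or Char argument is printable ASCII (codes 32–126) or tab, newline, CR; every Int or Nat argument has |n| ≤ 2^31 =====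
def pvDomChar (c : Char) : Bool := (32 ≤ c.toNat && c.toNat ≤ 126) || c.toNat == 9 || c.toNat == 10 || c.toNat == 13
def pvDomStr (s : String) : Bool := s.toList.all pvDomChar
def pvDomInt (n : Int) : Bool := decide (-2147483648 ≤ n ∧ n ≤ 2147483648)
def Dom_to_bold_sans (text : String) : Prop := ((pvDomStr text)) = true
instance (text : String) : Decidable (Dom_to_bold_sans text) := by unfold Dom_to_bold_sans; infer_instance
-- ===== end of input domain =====

-- B builds a translation table once and applies it with str.translate instead of A's per-character branch chain (idiomatic; same cost).

-- ===== PORT A =====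
-- A: loop over the characters, append the translated character (or the character itself) to a result list, join at the end.
def to_bold_sans (text : String) : String :=
  let result := text.toList.foldl (fun acc c =>
    if 'A' ≤ c ∧ c ≤ 'Z' then acc ++ [Char.ofNat (0x1D5D4 + c.toNat - 'A'.toNat)]
    else if 'a' ≤ c ∧ c ≤ 'z' then acc ++ [Char.ofNat (0x1D5EE + c.toNat - 'a'.toNat)]
    else if '0' ≤ c ∧ c ≤ '9' then acc ++ [Char.ofNat (0x1D7EC + c.toNat - '0'.toNat)]
    else acc ++ [c]) ([] : List Char)
  String.mk result

-- ===== PORT B =====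
-- the translation table of Source B: code point ↦ bold-sans character
def pvTable_to_bold_sans : PySem.Dict Int Char :=
  let t := (PySem.List.pyRange 0 26 1).foldl (fun d i =>
    (d.insert (65 + i) (Char.ofNat (0x1D5D4 + i.toNat))).insert (97 + i) (Char.ofNat (0x1D5EE + i.toNat)))
    PySem.Dict.empty
  (PySem.List.pyRange 0 10 1).foldl (fun d i =>
    d.insert (48 + i) (Char.ofNat (0x1D7EC + i.toNat))) t

-- str.translate: each character is replaced by its table entry, unmapped characters pass through
def to_bold_sans_alt (text : String) : String :=
  String.mk (text.toList.map (fun c => (pvTable_to_bold_sans.get? (Int.ofNat c.toNat)).getD c))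

-- ===== PRECONDITION & SPEC =====
def Spec_to_bold_sans (text : String) (out : String) : Prop := out = to_bold_sans_alt text
instance (text : String) (out : String) : Decidable (Spec_to_bold_sans text out) := by unfold Spec_to_bold_sans; infer_instance

-- ===== CLAIM (what is proved, stated in full; the proofs are below) =====
def Claim_equal_to_bold_sans : Prop := ∀ (text : String), Dom_to_bold_sans text → Spec_to_bold_sans text (to_bold_sans text)

-- ===== LEMMAS AND PROOFS =====
def pvStepA (c : Char) : Char :=
  if 'A' ≤ c ∧ c ≤ 'Z' then Char.ofNat (0x1D5D4 + c.toNat - 'A'.toNat)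
  else if 'a' ≤ c ∧ c ≤ 'z' then Char.ofNat (0x1D5EE + c.toNat - 'a'.toNat)
  else if '0' ≤ c ∧ c ≤ '9' then Char.ofNat (0x1D7EC + c.toNat - '0'.toNat)
  else c

def pvStepB (c : Char) : Char := (pvTable_to_bold_sans.get? (Int.ofNat c.toNat)).getD c

lemma foldA_eq_map (l : List Char) (acc : List Char) :
    l.foldl (fun acc c =>
      if 'A' ≤ c ∧ c ≤ 'Z' then acc ++ [Char.ofNat (0x1D5D4 + c.toNat - 'A'.toNat)]
      else if 'a' ≤ c ∧ c ≤ 'z' then acc ++ [Char.ofNat (0x1D5EE + c.toNat - 'a'.toNat)]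
      else if '0' ≤ c ∧ c ≤ '9' then acc ++ [Char.ofNat (0x1D7EC + c.toNat - '0'.toNat)]
      else acc ++ [c]) acc = acc ++ l.map pvStepA := by
  induction l generalizing acc with
  | nil => simp
  | cons c t ih =>
    rw [List.foldl_cons, List.map_cons]
    split_ifs <;> rw [ih] <;> simp [pvStepA, *]

set_option maxRecDepth 100000 in
lemma stepA_eq_stepB_ofNat : ∀ n, n < 127 → pvStepA (Char.ofNat n) = pvStepB (Char.ofNat n) := by
  decide

lemma stepA_eq_stepB (c : Char) (h : pvDomChar c = true) : pvStepA c = pvStepB c := by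
  have hlt : c.toNat < 127 := by
    simp only [pvDomChar, Bool.or_eq_true, Bool.and_eq_true, decide_eq_true_eq,
      beq_iff_eq] at h
    rcases h with ((⟨_, h⟩ | h) | h) | h <;> omega
  have := stepA_eq_stepB_ofNat c.toNat hlt
  rwa [Char.ofNat_toNat] at this

-- ===== VERDICT (by name: the statement is the Claim_ definition above) =====
theorem to_bold_sans_spec : Claim_equal_to_bold_sans := by
  intro text hdom
  unfold Spec_to_bold_sans to_bold_sans to_bold_sans_alt
  rw [foldA_eq_map]
  simp only [List.nil_append]
  apply congrArg
  apply List.map_congr_left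
  intro c hc
  have : pvDomChar c = true := by
    simp [Dom_to_bold_sans, pvDomStr, List.all_eq_true] at hdom
    exact hdom c hc
  exact stepA_eq_stepB c this
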